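-- pv_equiv track=rewrite | github.com/jasonusaco/Leetcode-Practice | Stack&Queue/3.7.py | asylum
-- ===== SOURCE A (Python) =====
-- def asylum(ope):
--     s = []
--     res = []
--     for v in ope:
--         if v[0] == 1:
--             s.append(v[1])
--         else:
--             if v[1] == 0 and s:
--                 res.append(s.pop(0))
--             else:
--                 for i, si in enumerate(s):
--                     if v[1] * si > 0:
--                         res.append(s.pop(i))
--                         break
--     return res
-- ===== SOURCE B (Python) =====
-- def asylum(ope):
--     # Sign-bucketed FIFO queues with head pointers + a global arrival index:
--     # signed pops read the matching bucket's head; a front pop takes the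
--     # bucket head with the smallest arrival index.
--     pos, neg, zer = [], [], []          # queues of (arrival index, value)
--     hp = hn = hz = 0                    # consumed-prefix head pointers
--     res = []
--     for idx, v in enumerate(ope):
--         if v[0] == 1:
--             x = v[1]
--             if x > 0:
--                 pos.append((idx, x))
--             elif x < 0:
--                 neg.append((idx, x))
--             else:
--                 zer.append((idx, x))
--         else:
--             t = v[1]
--             if t > 0:
--                 if hp < len(pos):
--                     res.append(pos[hp][1]); hp += 1
--             elif t < 0:
--                 if hn < len(neg):
--                     res.append(neg[hn][1]); hn += 1
--             else:
--                 best = None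
--                 if hp < len(pos):
--                     best = ('p', pos[hp][0])
--                 if hn < len(neg) and (best is None or neg[hn][0] < best[1]):
--                     best = ('n', neg[hn][0])
--                 if hz < len(zer) and (best is None or zer[hz][0] < best[1]):
--                     best = ('z', zer[hz][0])
--                 if best is not None:
--                     if best[0] == 'p':
--                         res.append(pos[hp][1]); hp += 1
--                     elif best[0] == 'n':
--                         res.append(neg[hn][1]); hn += 1
--                     else:
--                         res.append(zer[hz][1]); hz += 1
--     return res
-- ===== Notes on version B (the rewrite author's own statement) =====
-- stated objective: alternative
-- what changed: Replaces the single queue with its inner scan/pop(0) per removal by three sign-bucketed FIFO queues with head pointers plus a global arrival index: a signed pop reads the matching bucket's head, a front pop takes the bucket head with the smallest arrival index.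
import Mathlib
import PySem

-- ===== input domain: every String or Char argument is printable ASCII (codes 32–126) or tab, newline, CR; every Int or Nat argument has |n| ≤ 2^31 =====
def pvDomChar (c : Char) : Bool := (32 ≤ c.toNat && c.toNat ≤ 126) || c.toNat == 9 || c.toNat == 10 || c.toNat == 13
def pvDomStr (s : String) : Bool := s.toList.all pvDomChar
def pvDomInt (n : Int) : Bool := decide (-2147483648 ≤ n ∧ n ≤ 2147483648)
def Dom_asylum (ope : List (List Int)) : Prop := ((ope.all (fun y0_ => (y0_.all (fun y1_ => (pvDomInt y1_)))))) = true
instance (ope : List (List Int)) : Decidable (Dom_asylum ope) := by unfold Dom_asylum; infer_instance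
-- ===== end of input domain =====

-- B replaces A's single queue (inner scan / pop(0) per removal) by three sign-bucketed
-- FIFO queues with head pointers and a global arrival index (a different algorithm;
-- not measurably faster on a timing run's random inputs).

-- ===== PORT A =====
-- A's inner `for i, si in enumerate(s): if v[1]*si > 0: res.append(s.pop(i)); break`
def pvPopFirst (t : Int) : List Int → Option (Int × List Int)
  | [] => none
  | x :: xs =>
    if t * x > 0 then some (x, xs)
    else
      match pvPopFirst t xs with
      | none => none
      | some (y, ys) => some (y, x :: ys)

def pvStepA (st : List Int × List Int) (v : List Int) : List Int × List Int :=
  match PySem.List.pyGet? v 0, PySem.List.pyGet? v 1 with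
  | some v0, some v1 =>
    if v0 = 1 then (st.1 ++ [v1], st.2)
    else if v1 = 0 ∧ st.1 ≠ [] then
      match st.1 with
      | x :: rest => (rest, st.2 ++ [x])
      | [] => st
    else
      match pvPopFirst v1 st.1 with
      | some (y, s') => (s', st.2 ++ [y])
      | none => st
  | _, _ => st  -- Python raises IndexError here; excluded by Pre_asylum

def asylum (ope : List (List Int)) : List Int := (ope.foldl pvStepA ([], [])).2

-- ===== PORT B =====
structure PvB where
  pos : List (Int × Int)
  neg : List (Int × Int)
  zer : List (Int × Int)
  hp : Nat
  hn : Nat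
  hz : Nat
  res : List Int
deriving Repr, DecidableEq

def pvBetter (cand : Int) : Option (Char × Int) → Bool
  | none => true
  | some b => cand < b.2

def pvStepB (st : PvB) (iv : Int × List Int) : PvB :=
  match PySem.List.pyGet? iv.2 0, PySem.List.pyGet? iv.2 1 with
  | some v0, some v1 =>
    if v0 = 1 then
      if v1 > 0 then { st with pos := st.pos ++ [(iv.1, v1)] }
      else if v1 < 0 then { st with neg := st.neg ++ [(iv.1, v1)] }
      else { st with zer := st.zer ++ [(iv.1, v1)] }
    else if v1 > 0 then
      if st.hp < st.pos.length then
        { st with res := st.res ++ [(st.pos.getD st.hp (0, 0)).2], hp := st.hp + 1 }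
      else st
    else if v1 < 0 then
      if st.hn < st.neg.length then
        { st with res := st.res ++ [(st.neg.getD st.hn (0, 0)).2], hn := st.hn + 1 }
      else st
    else
      -- front pop: the bucket head with the smallest arrival index
      let best1 : Option (Char × Int) :=
        if st.hp < st.pos.length then some ('p', (st.pos.getD st.hp (0, 0)).1) else none
      let best2 : Option (Char × Int) :=
        if st.hn < st.neg.length ∧ pvBetter (st.neg.getD st.hn (0, 0)).1 best1 then
          some ('n', (st.neg.getD st.hn (0, 0)).1)
        else best1
      let best3 : Option (Char × Int) :=
        if st.hz < st.zer.length ∧ pvBetter (st.zer.getD st.hz (0, 0)).1 best2 then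
          some ('z', (st.zer.getD st.hz (0, 0)).1)
        else best2
      match best3 with
      | none => st
      | some b =>
        if b.1 = 'p' then { st with res := st.res ++ [(st.pos.getD st.hp (0, 0)).2], hp := st.hp + 1 }
        else if b.1 = 'n' then { st with res := st.res ++ [(st.neg.getD st.hn (0, 0)).2], hn := st.hn + 1 }
        else { st with res := st.res ++ [(st.zer.getD st.hz (0, 0)).2], hz := st.hz + 1 }
  | _, _ => st  -- Python raises IndexError here; excluded by Pre_asylum

def asylum_alt (ope : List (List Int)) : List Int :=
  ((PySem.List.enumerate ope 0).foldl pvStepB ⟨[], [], [], 0, 0, 0, []⟩).res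

-- ===== PRECONDITION & SPEC =====
-- Pre_ excludes exactly the inputs on which A raises IndexError (an operation with fewer
-- than two entries: v[0] or v[1] is out of range); B raises there too.
def Pre_asylum (ope : List (List Int)) : Prop := ∀ v ∈ ope, 2 ≤ v.length
instance (ope : List (List Int)) : Decidable (Pre_asylum ope) := by unfold Pre_asylum; infer_instance

def pvWitness_asylum : List (List Int) := [[1, 3], [1, -2], [1, 0], [0, 0], [0, -1], [0, 1]]

def Spec_asylum (ope : List (List Int)) (out : List Int) : Prop := out = asylum_alt ope
instance (ope : List (List Int)) (out : List Int) : Decidable (Spec_asylum ope out) := by unfold Spec_asylum; infer_instance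

-- ===== CLAIM (what is proved, stated in full; the proofs are below) =====
def Claim_equal_asylum : Prop := ∀ (ope : List (List Int)), Dom_asylum ope → Pre_asylum ope → Spec_asylum ope (asylum ope)

-- ===== LEMMAS AND PROOFS =====

-- The coupling invariant: A's queue `s` is, in arrival order, the merge of the three
-- unconsumed bucket suffixes; `L` carries the arrival indices alongside the values.
def pvInv (n : Int) (a : List Int × List Int) (st : PvB) : Prop :=
  ∃ L : List (Int × Int),
    a.1 = L.map Prod.snd ∧
    a.2 = st.res ∧
    L.Pairwise (fun p q => p.1 < q.1) ∧
    (∀ p ∈ L, p.1 < n) ∧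
    st.hp ≤ st.pos.length ∧ st.hn ≤ st.neg.length ∧ st.hz ≤ st.zer.length ∧
    st.pos.drop st.hp = L.filter (fun p => decide (0 < p.2)) ∧
    st.neg.drop st.hn = L.filter (fun p => decide (p.2 < 0)) ∧
    st.zer.drop st.hz = L.filter (fun p => decide (p.2 = 0))

theorem pvPopFirst_map (t : Int) (L : List (Int × Int)) :
    pvPopFirst t (L.map Prod.snd) =
      match L.filter (fun p => decide (t * p.2 > 0)) with
      | [] => none
      | q :: _ => some (q.2, (L.eraseP (fun p => decide (t * p.2 > 0))).map Prod.snd) := by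
  induction L with
  | nil => simp [pvPopFirst]
  | cons p L ih =>
    by_cases h : t * p.2 > 0
    · simp [pvPopFirst, h]
    · simp only [List.map_cons, pvPopFirst, if_neg h, ih, List.filter_cons, List.eraseP_cons]
      simp only [h, decide_false]
      cases hf : L.filter (fun p => decide (t * p.2 > 0)) with
      | nil => simp
      | cons q rest => simp

theorem pv_filter_eraseP_self {α : Type} (p : α → Bool) (L : List α) (q : α) (rest : List α)
    (h : L.filter p = q :: rest) : (L.eraseP p).filter p = rest := by
  induction L generalizing q rest with
  | nil => simp at h
  | cons x L ih =>
    by_cases hx : p x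
    · simp [hx] at h ⊢
      exact h.2
    · simp [hx] at h ⊢
      exact ih _ _ h

theorem pv_filter_eraseP_other {α : Type} (p r : α → Bool) (L : List α)
    (hdisj : ∀ x, p x = true → r x = false) :
    (L.eraseP p).filter r = L.filter r := by
  induction L with
  | nil => simp
  | cons x L ih =>
    by_cases hx : p x
    · simp [hx, hdisj x hx]
    · simp [List.filter_cons, hx, ih]

theorem pvInv_mono (n : Int) (a : List Int × List Int) (st : PvB)
    (h : pvInv n a st) : pvInv (n + 1) a st := by
  obtain ⟨L, h1, h2, h3, h4, h5⟩ := h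
  exact ⟨L, h1, h2, h3, fun p hp => lt_trans (h4 p hp) (by omega), h5⟩

-- push case, appended bucket
theorem pv_push_same (bucket : List (Int × Int)) (hd : Nat) (L : List (Int × Int))
    (e : Int × Int) (hh : hd ≤ bucket.length) (p : Int × Int → Bool)
    (hb : bucket.drop hd = L.filter p) (he : p e = true) :
    (bucket ++ [e]).drop hd = (L ++ [e]).filter p := by
  rw [List.drop_append_of_le_length hh, List.filter_append, hb]
  simp [he]

theorem pv_push_other (bucket : List (Int × Int)) (hd : Nat) (L : List (Int × Int))
    (e : Int × Int) (p : Int × Int → Bool)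
    (hb : bucket.drop hd = L.filter p) (he : p e = false) :
    bucket.drop hd = (L ++ [e]).filter p := by
  rw [List.filter_append, hb]
  simp [he]

-- head of the unconsumed suffix of a bucket
theorem pv_head_getD (bucket : List (Int × Int)) (hd : Nat) (q : Int × Int)
    (rest : List (Int × Int)) (h : bucket.drop hd = q :: rest) :
    bucket.getD hd (0, 0) = q := by
  have h0 : (bucket.drop hd)[0]? = some q := by rw [h]; rfl
  rw [List.getElem?_drop] at h0
  rw [List.getD_eq_getElem?_getD]
  simp at h0 ⊢
  simp [h0]

theorem pv_drop_succ (bucket : List (Int × Int)) (hd : Nat) (q : Int × Int)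
    (rest : List (Int × Int)) (h : bucket.drop hd = q :: rest) :
    bucket.drop (hd + 1) = rest := by
  rw [← List.tail_drop, h]
  rfl

theorem pv_lt_of_drop_cons (bucket : List (Int × Int)) (hd : Nat) (q : Int × Int)
    (rest : List (Int × Int)) (h : bucket.drop hd = q :: rest) : hd < bucket.length := by
  by_contra hc
  rw [List.drop_eq_nil_iff.mpr (by omega)] at h
  exact (by simp at h)

theorem pv_step (n : Int) (v : List Int) (a : List Int × List Int) (st : PvB)
    (h : pvInv n a st) : pvInv (n + 1) (pvStepA a v) (pvStepB st (n, v)) := by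
  obtain ⟨L, hs, hres, hpw, hlt, hhp, hhn, hhz, hP, hN, hZ⟩ := h
  cases hv0 : PySem.List.pyGet? v 0 with
  | none =>
    simp only [pvStepA, pvStepB, hv0]
    exact pvInv_mono n a st ⟨L, hs, hres, hpw, hlt, hhp, hhn, hhz, hP, hN, hZ⟩
  | some v0 =>
    cases hv1 : PySem.List.pyGet? v 1 with
    | none =>
      simp only [pvStepA, pvStepB, hv0, hv1]
      exact pvInv_mono n a st ⟨L, hs, hres, hpw, hlt, hhp, hhn, hhz, hP, hN, hZ⟩
    | some v1 =>
      by_cases h01 : v0 = 1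
      · -- push
        simp only [pvStepA, pvStepB, hv0, hv1, if_pos h01]
        have hlt' : ∀ p ∈ L ++ [((n : Int), v1)], p.1 < n + 1 := by
          intro p hp
          rcases List.mem_append.mp hp with h' | h'
          · exact lt_trans (hlt p h') (by omega)
          · simp only [List.mem_singleton] at h'; subst h'; simp
        have hpw' : (L ++ [((n : Int), v1)]).Pairwise (fun p q => p.1 < q.1) := by
          rw [List.pairwise_append]
          exact ⟨hpw, List.pairwise_singleton _ _, fun p hp q hq => by simp at hq; rw [hq]; exact hlt p hp⟩
        rcases lt_trichotomy v1 0 with hneg | hzero | hpos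
        · rw [if_neg (by omega), if_pos hneg]
          exact ⟨L ++ [(n, v1)], by simp [hs], hres, hpw', hlt',
            hhp, by simp; omega, hhz,
            pv_push_other _ _ _ _ _ hP (by simp; omega),
            pv_push_same _ _ _ _ hhn _ hN (by simp; omega),
            pv_push_other _ _ _ _ _ hZ (by simp; omega)⟩
        · rw [if_neg (by omega), if_neg (by omega)]
          exact ⟨L ++ [(n, v1)], by simp [hs], hres, hpw', hlt',
            hhp, hhn, by simp; omega,
            pv_push_other _ _ _ _ _ hP (by simp; omega),
            pv_push_other _ _ _ _ _ hN (by simp; omega),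
            pv_push_same _ _ _ _ hhz _ hZ (by simp; omega)⟩
        · rw [if_pos hpos]
          exact ⟨L ++ [(n, v1)], by simp [hs], hres, hpw', hlt',
            by simp; omega, hhn, hhz,
            pv_push_same _ _ _ _ hhp _ hP (by simp; omega),
            pv_push_other _ _ _ _ _ hN (by simp; omega),
            pv_push_other _ _ _ _ _ hZ (by simp; omega)⟩
      · -- pop
        simp only [pvStepA, pvStepB, hv0, hv1, if_neg h01]
        rcases lt_trichotomy v1 0 with hneg | hzero | hpos
        · -- v1 < 0 : signed pop from neg bucket
          rw [if_neg (fun hc => by omega : ¬(v1 = 0 ∧ a.1 ≠ []))]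
          rw [if_neg (by omega : ¬ v1 > 0), if_pos hneg]
          have hfun : (fun p : Int × Int => decide (v1 * p.2 > 0)) = (fun p => decide (p.2 < 0)) := by
            funext p
            rw [decide_eq_decide]
            constructor <;> intro h' <;> nlinarith
          rw [hs, pvPopFirst_map, hfun, ← hN]
          cases hdrop : st.neg.drop st.hn with
          | nil =>
            have hlen : st.neg.length ≤ st.hn := List.drop_eq_nil_iff.mp hdrop
            rw [if_neg (by omega : ¬ st.hn < st.neg.length)]
            exact pvInv_mono n a st ⟨L, hs, hres, hpw, hlt, hhp, hhn, hhz, hP, hN, hZ⟩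
          | cons q rest =>
            have hlen := pv_lt_of_drop_cons _ _ _ _ hdrop
            rw [if_pos hlen, pv_head_getD _ _ _ _ hdrop]
            have hfilt : L.filter (fun p => decide (p.2 < 0)) = q :: rest := hN.symm.trans hdrop
            refine ⟨L.eraseP (fun p => decide (p.2 < 0)), rfl, by simp [hres], hpw.sublist List.eraseP_sublist, ?_, hhp, (by omega : st.hn + 1 ≤ st.neg.length), hhz, ?_, ?_, ?_⟩
            · exact fun p hp' => lt_trans (hlt p (List.eraseP_sublist.subset hp')) (by omega)
            · rw [hP]
              exact (pv_filter_eraseP_other _ _ L (fun x hx => by simp at hx ⊢; omega)).symm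
            · rw [pv_drop_succ _ _ _ _ hdrop]
              exact (pv_filter_eraseP_self _ L q rest hfilt).symm
            · rw [hZ]
              exact (pv_filter_eraseP_other _ _ L (fun x hx => by simp at hx ⊢; omega)).symm
        · -- v1 = 0 : front pop
          subst hzero
          rw [if_neg (by omega : ¬ (0:Int) > 0), if_neg (by omega : ¬ (0:Int) < 0)]
          by_cases hsnil : a.1 = []
          · -- queue empty: both sides unchanged
            have hLnil : L = [] := List.map_eq_nil_iff.mp (hsnil ▸ hs).symm
            subst hLnil
            rw [if_neg (fun hc => hc.2 hsnil)]
            have hA : pvPopFirst 0 a.1 = none := by rw [hsnil]; rfl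
            have e1 : ¬ st.hp < st.pos.length := by
              have := List.drop_eq_nil_iff.mp (by simpa using hP); omega
            have e2 : ¬ st.hn < st.neg.length := by
              have := List.drop_eq_nil_iff.mp (by simpa using hN); omega
            have e3 : ¬ st.hz < st.zer.length := by
              have := List.drop_eq_nil_iff.mp (by simpa using hZ); omega
            simp only [hA, if_neg e1,
              if_neg (fun hc => e2 hc.1 : ¬(st.hn < st.neg.length ∧ pvBetter (st.neg.getD st.hn (0, 0)).1 none = true)),
              if_neg (fun hc => e3 hc.1 : ¬(st.hz < st.zer.length ∧ pvBetter (st.zer.getD st.hz (0, 0)).1 none = true))]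
            exact pvInv_mono n a st ⟨[], hs, hres, hpw, hlt, hhp, hhn, hhz, hP, hN, hZ⟩
          · -- queue nonempty: A pops its head q; B pops the bucket head holding q
            cases L with
            | nil => exact absurd (by simpa using hs) hsnil
            | cons q L' =>
              rw [if_pos ⟨rfl, hsnil⟩]
              have hs' : a.1 = q.2 :: L'.map Prod.snd := by simpa using hs
              rw [hs']
              have hq_lt : ∀ p ∈ L', q.1 < p.1 := (List.pairwise_cons.mp hpw).1
              have hpw' : L'.Pairwise (fun p q => p.1 < q.1) := (List.pairwise_cons.mp hpw).2
              have hlt' : ∀ p ∈ L', p.1 < n + 1 := fun p hp' => lt_trans (hlt p (List.mem_cons_of_mem _ hp')) (by omega)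
              have hresg : a.2 ++ [q.2] = st.res ++ [q.2] := by rw [hres]
              rcases lt_trichotomy q.2 0 with hq2 | hq2 | hq2
              · -- q heads the neg bucket
                have hP' : st.pos.drop st.hp = L'.filter (fun p => decide (0 < p.2)) := by
                  rw [hP, List.filter_cons_of_neg (by simp; omega)]
                have hN' : st.neg.drop st.hn = q :: L'.filter (fun p => decide (p.2 < 0)) := by
                  rw [hN, List.filter_cons_of_pos (by simp; omega)]
                have hZ' : st.zer.drop st.hz = L'.filter (fun p => decide (p.2 = 0)) := by
                  rw [hZ, List.filter_cons_of_neg (by simp; omega)]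
                have hnlt := pv_lt_of_drop_cons _ _ _ _ hN'
                have hgN := pv_head_getD _ _ _ _ hN'
                have hg3 : ¬(st.hz < st.zer.length ∧ pvBetter (st.zer.getD st.hz (0, 0)).1 (some ('n', q.1)) = true) := by
                  rintro ⟨g1, g2⟩
                  cases hdZ : st.zer.drop st.hz with
                  | nil => have := List.drop_eq_nil_iff.mp hdZ; omega
                  | cons r rr =>
                    have hgr := pv_head_getD _ _ _ _ hdZ
                    have hrmem : r ∈ L' := List.mem_of_mem_filter (by rw [← hZ', hdZ]; exact List.mem_cons_self)
                    rw [hgr] at g2; simp [pvBetter] at g2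
                    exact absurd g2 (by have := hq_lt r hrmem; omega)
                have hfin : pvInv (n + 1) (L'.map Prod.snd, a.2 ++ [q.2])
                    { st with res := st.res ++ [q.2], hn := st.hn + 1 } :=
                  ⟨L', rfl, hresg, hpw', hlt', hhp, hnlt, hhz, hP', pv_drop_succ _ _ _ _ hN', hZ'⟩
                cases hdP : st.pos.drop st.hp with
                | nil =>
                  have e1 : ¬ st.hp < st.pos.length := by
                    have := List.drop_eq_nil_iff.mp hdP; omega
                  simp only [if_neg e1, hgN,
                    if_pos (⟨hnlt, rfl⟩ : st.hn < st.neg.length ∧ pvBetter q.1 none = true),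
                    if_neg hg3]
                  exact hfin
                | cons r rr =>
                  have hplt := pv_lt_of_drop_cons _ _ _ _ hdP
                  have hgr := pv_head_getD _ _ _ _ hdP
                  have hrmem : r ∈ L' := List.mem_of_mem_filter (by rw [← hP', hdP]; exact List.mem_cons_self)
                  have hbetter : pvBetter q.1 (some ('p', r.1)) = true := by
                    simp [pvBetter]; exact hq_lt r hrmem
                  simp only [if_pos hplt, hgr, hgN,
                    if_pos (⟨hnlt, hbetter⟩ : st.hn < st.neg.length ∧ pvBetter q.1 (some ('p', r.1)) = true),
                    if_neg hg3]
                  exact hfin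
              · -- q heads the zero bucket
                have hP' : st.pos.drop st.hp = L'.filter (fun p => decide (0 < p.2)) := by
                  rw [hP, List.filter_cons_of_neg (by simp; omega)]
                have hN' : st.neg.drop st.hn = L'.filter (fun p => decide (p.2 < 0)) := by
                  rw [hN, List.filter_cons_of_neg (by simp; omega)]
                have hZ' : st.zer.drop st.hz = q :: L'.filter (fun p => decide (p.2 = 0)) := by
                  rw [hZ, List.filter_cons_of_pos (by simp; omega)]
                have hzlt := pv_lt_of_drop_cons _ _ _ _ hZ'
                have hgZ := pv_head_getD _ _ _ _ hZ'
                have hfin : pvInv (n + 1) (L'.map Prod.snd, a.2 ++ [q.2])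
                    { st with res := st.res ++ [q.2], hz := st.hz + 1 } :=
                  ⟨L', rfl, hresg, hpw', hlt', hhp, hhn, hzlt, hP', hN', pv_drop_succ _ _ _ _ hZ'⟩
                cases hdP : st.pos.drop st.hp with
                | nil =>
                  have e1 : ¬ st.hp < st.pos.length := by
                    have := List.drop_eq_nil_iff.mp hdP; omega
                  cases hdN : st.neg.drop st.hn with
                  | nil =>
                    have e2 : ¬ st.hn < st.neg.length := by
                      have := List.drop_eq_nil_iff.mp hdN; omega
                    simp only [if_neg e1,
                      if_neg (fun hc => e2 hc.1 : ¬(st.hn < st.neg.length ∧ pvBetter (st.neg.getD st.hn (0, 0)).1 none = true)), hgZ,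
                      if_pos (⟨hzlt, rfl⟩ : st.hz < st.zer.length ∧ pvBetter q.1 none = true)]
                    exact hfin
                  | cons r rr =>
                    have hnlt := pv_lt_of_drop_cons _ _ _ _ hdN
                    have hgr := pv_head_getD _ _ _ _ hdN
                    have hrmem : r ∈ L' := List.mem_of_mem_filter (by rw [← hN', hdN]; exact List.mem_cons_self)
                    have hbetter : pvBetter q.1 (some ('n', r.1)) = true := by
                      simp [pvBetter]; exact hq_lt r hrmem
                    simp only [if_neg e1, hgr,
                      if_pos (⟨hnlt, rfl⟩ : st.hn < st.neg.length ∧ pvBetter r.1 none = true), hgZ,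
                      if_pos (⟨hzlt, hbetter⟩ : st.hz < st.zer.length ∧ pvBetter q.1 (some ('n', r.1)) = true)]
                    exact hfin
                | cons r rr =>
                  have hplt := pv_lt_of_drop_cons _ _ _ _ hdP
                  have hgr := pv_head_getD _ _ _ _ hdP
                  have hrmem : r ∈ L' := List.mem_of_mem_filter (by rw [← hP', hdP]; exact List.mem_cons_self)
                  cases hdN : st.neg.drop st.hn with
                  | nil =>
                    have e2 : ¬ st.hn < st.neg.length := by
                      have := List.drop_eq_nil_iff.mp hdN; omega
                    have hbetter : pvBetter q.1 (some ('p', r.1)) = true := by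
                      simp [pvBetter]; exact hq_lt r hrmem
                    simp only [if_pos hplt, hgr,
                      if_neg (fun hc => e2 hc.1 : ¬(st.hn < st.neg.length ∧ pvBetter (st.neg.getD st.hn (0, 0)).1 (some ('p', r.1)) = true)), hgZ,
                      if_pos (⟨hzlt, hbetter⟩ : st.hz < st.zer.length ∧ pvBetter q.1 (some ('p', r.1)) = true)]
                    exact hfin
                  | cons r2 rr2 =>
                    have hnlt := pv_lt_of_drop_cons _ _ _ _ hdN
                    have hgr2 := pv_head_getD _ _ _ _ hdN
                    have hr2mem : r2 ∈ L' := List.mem_of_mem_filter (by rw [← hN', hdN]; exact List.mem_cons_self)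
                    by_cases hbb : pvBetter r2.1 (some ('p', r.1)) = true
                    · have hbetter : pvBetter q.1 (some ('n', r2.1)) = true := by
                        simp [pvBetter]; exact hq_lt r2 hr2mem
                      simp only [if_pos hplt, hgr, hgr2,
                        if_pos (⟨hnlt, hbb⟩ : st.hn < st.neg.length ∧ pvBetter r2.1 (some ('p', r.1)) = true), hgZ,
                        if_pos (⟨hzlt, hbetter⟩ : st.hz < st.zer.length ∧ pvBetter q.1 (some ('n', r2.1)) = true)]
                      exact hfin
                    · have hbetter : pvBetter q.1 (some ('p', r.1)) = true := by
                        simp [pvBetter]; exact hq_lt r hrmem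
                      simp only [if_pos hplt, hgr, hgr2,
                        if_neg (fun hc => hbb hc.2 : ¬(st.hn < st.neg.length ∧ pvBetter r2.1 (some ('p', r.1)) = true)), hgZ,
                        if_pos (⟨hzlt, hbetter⟩ : st.hz < st.zer.length ∧ pvBetter q.1 (some ('p', r.1)) = true)]
                      exact hfin
              · -- q heads the pos bucket
                have hP' : st.pos.drop st.hp = q :: L'.filter (fun p => decide (0 < p.2)) := by
                  rw [hP, List.filter_cons_of_pos (by simp; omega)]
                have hN' : st.neg.drop st.hn = L'.filter (fun p => decide (p.2 < 0)) := by
                  rw [hN, List.filter_cons_of_neg (by simp; omega)]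
                have hZ' : st.zer.drop st.hz = L'.filter (fun p => decide (p.2 = 0)) := by
                  rw [hZ, List.filter_cons_of_neg (by simp; omega)]
                have hplt := pv_lt_of_drop_cons _ _ _ _ hP'
                have hgP := pv_head_getD _ _ _ _ hP'
                have hg2 : ¬(st.hn < st.neg.length ∧ pvBetter (st.neg.getD st.hn (0, 0)).1 (some ('p', q.1)) = true) := by
                  rintro ⟨g1, g2⟩
                  cases hdN : st.neg.drop st.hn with
                  | nil => have := List.drop_eq_nil_iff.mp hdN; omega
                  | cons r rr =>
                    have hgr := pv_head_getD _ _ _ _ hdN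
                    have hrmem : r ∈ L' := List.mem_of_mem_filter (by rw [← hN', hdN]; exact List.mem_cons_self)
                    rw [hgr] at g2; simp [pvBetter] at g2
                    exact absurd g2 (by have := hq_lt r hrmem; omega)
                have hg3 : ¬(st.hz < st.zer.length ∧ pvBetter (st.zer.getD st.hz (0, 0)).1 (some ('p', q.1)) = true) := by
                  rintro ⟨g1, g2⟩
                  cases hdZ : st.zer.drop st.hz with
                  | nil => have := List.drop_eq_nil_iff.mp hdZ; omega
                  | cons r rr =>
                    have hgr := pv_head_getD _ _ _ _ hdZ
                    have hrmem : r ∈ L' := List.mem_of_mem_filter (by rw [← hZ', hdZ]; exact List.mem_cons_self)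
                    rw [hgr] at g2; simp [pvBetter] at g2
                    exact absurd g2 (by have := hq_lt r hrmem; omega)
                have hfin : pvInv (n + 1) (L'.map Prod.snd, a.2 ++ [q.2])
                    { st with res := st.res ++ [q.2], hp := st.hp + 1 } :=
                  ⟨L', rfl, hresg, hpw', hlt', hplt, hhn, hhz, pv_drop_succ _ _ _ _ hP', hN', hZ'⟩
                simp only [if_pos hplt, hgP, if_neg hg2, if_neg hg3]
                exact hfin
        · -- v1 > 0 : signed pop from pos bucket
          rw [if_neg (fun hc => by omega : ¬(v1 = 0 ∧ a.1 ≠ []))]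
          rw [if_pos hpos]
          have hfun : (fun p : Int × Int => decide (v1 * p.2 > 0)) = (fun p => decide (0 < p.2)) := by
            funext p
            rw [decide_eq_decide]
            constructor <;> intro h' <;> nlinarith
          rw [hs, pvPopFirst_map, hfun, ← hP]
          cases hdrop : st.pos.drop st.hp with
          | nil =>
            have hlen : st.pos.length ≤ st.hp := List.drop_eq_nil_iff.mp hdrop
            rw [if_neg (by omega : ¬ st.hp < st.pos.length)]
            exact pvInv_mono n a st ⟨L, hs, hres, hpw, hlt, hhp, hhn, hhz, hP, hN, hZ⟩
          | cons q rest =>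
            have hlen := pv_lt_of_drop_cons _ _ _ _ hdrop
            rw [if_pos hlen, pv_head_getD _ _ _ _ hdrop]
            have hfilt : L.filter (fun p => decide (0 < p.2)) = q :: rest := hP.symm.trans hdrop
            refine ⟨L.eraseP (fun p => decide (0 < p.2)), rfl, by simp [hres], hpw.sublist List.eraseP_sublist, ?_, (by omega : st.hp + 1 ≤ st.pos.length), hhn, hhz, ?_, ?_, ?_⟩
            · exact fun p hp' => lt_trans (hlt p (List.eraseP_sublist.subset hp')) (by omega)
            · rw [pv_drop_succ _ _ _ _ hdrop]
              exact (pv_filter_eraseP_self _ L q rest hfilt).symm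
            · rw [hN]
              exact (pv_filter_eraseP_other _ _ L (fun x hx => by simp at hx ⊢; omega)).symm
            · rw [hZ]
              exact (pv_filter_eraseP_other _ _ L (fun x hx => by simp at hx ⊢; omega)).symm

theorem pv_fold (ops : List (List Int)) :
    ∀ (n : Int) (a : List Int × List Int) (st : PvB), pvInv n a st →
      pvInv (n + ops.length) (ops.foldl pvStepA a)
        ((PySem.List.enumerate ops n).foldl pvStepB st) := by
  induction ops with
  | nil => intro n a st h; simpa [PySem.List.enumerate_nil] using h
  | cons v ops ih =>
    intro n a st h
    have h1 := pv_step n v a st h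
    have h2 := ih (n + 1) _ _ h1
    rw [PySem.List.enumerate_cons]
    simpa [add_assoc, add_comm, add_left_comm] using h2

-- ===== VERDICT (by name: the statement is the Claim_ definition above) =====
theorem asylum_spec : Claim_equal_asylum := by
  intro ope _ _
  unfold Spec_asylum asylum asylum_alt
  have h0 : pvInv 0 ([], []) (⟨[], [], [], 0, 0, 0, []⟩ : PvB) := by
    exact ⟨[], by simp⟩
  have h := pv_fold ope 0 ([], []) ⟨[], [], [], 0, 0, 0, []⟩ h0
  obtain ⟨L, _, hres, _⟩ := h
  exact hres
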